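-- pv_equiv track=rewrite | github.com/bobbydmartino/Data_analytics | zen_utils.py | generate_awards
-- ===== SOURCE A (Python) =====
-- def generate_awards(awards):
--     aw = []
--     for x in awards:
--         aw.append(x['type'])
--
--     d = {'roy':0,'mvp':0,'ss':0,'ws':0,'wsmvp':0,'cy':0}
--     for x in aw:
--         if x == u'Rookie of the Year':
--             d['roy'] = 1
--         if x[:14] == u'Silver Slugger':
--             d['ss'] += 1
--         if x == u'Most Valuable Player':
--             d['mvp'] += 1
--         if x == u'World Series MVP':
--             d['wsmvp'] += 1
--         if x == u'Won World Series':
--             d['ws'] += 1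
--         if x == u'Cy Young Award':
--             d['cy'] += 1
--     return d
-- ===== SOURCE B (Python) =====
-- def generate_awards(awards):
--     # Build a frequency table of award types in one pass, then derive the
--     # six summary entries from the table (direct lookups, a truthiness flag
--     # for roy, and a prefix-filtered sum over distinct keys for ss).
--     counts = {}
--     for x in awards:
--         t = x['type']
--         counts[t] = counts.get(t, 0) + 1
--     return {
--         'roy': 1 if counts.get(u'Rookie of the Year', 0) else 0,
--         'mvp': counts.get(u'Most Valuable Player', 0),
--         'ss': sum(c for k, c in counts.items() if k[:14] == u'Silver Slugger'),
--         'ws': counts.get(u'Won World Series', 0),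
--         'wsmvp': counts.get(u'World Series MVP', 0),
--         'cy': counts.get(u'Cy Young Award', 0),
--     }
-- ===== Notes on version B (the rewrite author's own statement) =====
-- stated objective: alternative
-- what changed: A tallies six hard-coded keys per element in a second loop over an extracted type list; B builds a frequency table of types in one pass and derives the summary from the table (lookups, a truthiness flag for roy, and a prefix-filtered sum over distinct keys for ss).
import Mathlib
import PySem

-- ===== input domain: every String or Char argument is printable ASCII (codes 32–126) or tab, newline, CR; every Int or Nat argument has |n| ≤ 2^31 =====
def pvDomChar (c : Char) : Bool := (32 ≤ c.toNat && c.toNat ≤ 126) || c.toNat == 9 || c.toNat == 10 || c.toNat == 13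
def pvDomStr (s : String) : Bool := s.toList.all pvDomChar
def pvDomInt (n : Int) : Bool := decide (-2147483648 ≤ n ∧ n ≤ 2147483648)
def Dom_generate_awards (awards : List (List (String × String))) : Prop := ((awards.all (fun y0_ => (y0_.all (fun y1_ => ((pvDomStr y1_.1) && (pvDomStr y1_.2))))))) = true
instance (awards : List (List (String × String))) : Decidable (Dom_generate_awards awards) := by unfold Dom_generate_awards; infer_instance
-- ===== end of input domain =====

-- B builds a frequency table of types in one pass and derives the summary from it,
-- instead of A's per-element tally into six hard-coded keys (alternative decomposition).

-- x['type'] for a row (raises KeyError if absent; Pre_ guarantees presence, getD "" is never taken inside Pre_)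
def pvTy (x : List (String × String)) : String :=
  ((PySem.Dict.mk x).get? "type").getD ""

-- ===== PORT A =====
-- one iteration of A's second loop (branches in A's source order; d['k'] += 1 on an always-present key = modify)
def pvStepA (d : PySem.Dict String Int) (x : String) : PySem.Dict String Int :=
  let d := if x == "Rookie of the Year" then d.insert "roy" 1 else d
  let d := if PySem.Str.slice x none (some 14) == "Silver Slugger" then d.modify "ss" 0 (· + 1) else d
  let d := if x == "Most Valuable Player" then d.modify "mvp" 0 (· + 1) else d
  let d := if x == "World Series MVP" then d.modify "wsmvp" 0 (· + 1) else d
  let d := if x == "Won World Series" then d.modify "ws" 0 (· + 1) else d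
  let d := if x == "Cy Young Award" then d.modify "cy" 0 (· + 1) else d
  d

def generate_awards (awards : List (List (String × String))) : List (String × Int) :=
  let aw : List String := awards.foldl (fun acc x => acc ++ [pvTy x]) []
  let d : PySem.Dict String Int :=
    PySem.Dict.mk [("roy", 0), ("mvp", 0), ("ss", 0), ("ws", 0), ("wsmvp", 0), ("cy", 0)]
  (aw.foldl pvStepA d).items

-- ===== PORT B =====

-- B's python binds t = x['type'] then does counts[t] = counts.get(t, 0) + 1
def pvStepB (d : PySem.Dict String Int) (t : String) : PySem.Dict String Int :=
  d.insert t (d.getD t 0 + 1)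
def generate_awards_alt (awards : List (List (String × String))) : List (String × Int) :=
  let counts : PySem.Dict String Int :=
    awards.foldl (fun d x => pvStepB d (pvTy x)) PySem.Dict.empty
  [("roy", if counts.getD "Rookie of the Year" 0 ≠ 0 then 1 else 0),
   ("mvp", counts.getD "Most Valuable Player" 0),
   ("ss", ((counts.items.filter
             (fun kv => PySem.Str.slice kv.1 none (some 14) == "Silver Slugger")).map (·.2)).sum),
   ("ws", counts.getD "Won World Series" 0),
   ("wsmvp", counts.getD "World Series MVP" 0),
   ("cy", counts.getD "Cy Young Award" 0)]

-- ===== PRECONDITION & SPEC =====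
-- Pre_ excludes exactly the rows without a 'type' key, on which A raises KeyError (B raises too).
def Pre_generate_awards (awards : List (List (String × String))) : Prop :=
  (awards.all (fun x => x.any (fun kv => kv.1 == "type"))) = true
instance (awards : List (List (String × String))) : Decidable (Pre_generate_awards awards) := by
  unfold Pre_generate_awards; infer_instance
def pvWitness_generate_awards : (List (List (String × String))) :=
  [[("type", "Cy Young Award")], [("type", "Silver Slugger (OF)")]]
def Spec_generate_awards (awards : List (List (String × String))) (out : List (String × Int)) : Prop := out = generate_awards_alt awards
instance (awards : List (List (String × String))) (out : List (String × Int)) : Decidable (Spec_generate_awards awards out) := by unfold Spec_generate_awards; infer_instance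

-- ===== CLAIM (what is proved, stated in full; the proofs are below) =====
def Claim_equal_generate_awards : Prop := ∀ (awards : List (List (String × String))), Dom_generate_awards awards → Pre_generate_awards awards → Spec_generate_awards awards (generate_awards awards)

-- ===== LEMMAS AND PROOFS =====


def pvSS (x : String) : Bool := PySem.Str.slice x none (some 14) == "Silver Slugger"

theorem pvStepA_eq (x : String) (r m s w wm c : Int) :
    pvStepA ⟨[("roy",r),("mvp",m),("ss",s),("ws",w),("wsmvp",wm),("cy",c)]⟩ x =
    ⟨[("roy", if x = "Rookie of the Year" then 1 else r),
      ("mvp", if x = "Most Valuable Player" then m+1 else m),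
      ("ss", if pvSS x then s+1 else s),
      ("ws", if x = "Won World Series" then w+1 else w),
      ("wsmvp", if x = "World Series MVP" then wm+1 else wm),
      ("cy", if x = "Cy Young Award" then c+1 else c)]⟩ := by
  simp only [pvStepA, pvSS, beq_iff_eq]
  split_ifs <;> simp_all [PySem.Dict.insert, PySem.Dict.modify, PySem.Dict.contains,
    PySem.Dict.get?, PySem.Dict.getD]

theorem pvFoldA (l : List String) : ∀ (r m s w wm c : Int),
    l.foldl pvStepA ⟨[("roy",r),("mvp",m),("ss",s),("ws",w),("wsmvp",wm),("cy",c)]⟩ =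
    ⟨[("roy", if "Rookie of the Year" ∈ l then 1 else r),
      ("mvp", m + l.count "Most Valuable Player"),
      ("ss", s + l.countP pvSS),
      ("ws", w + l.count "Won World Series"),
      ("wsmvp", wm + l.count "World Series MVP"),
      ("cy", c + l.count "Cy Young Award")]⟩ := by
  induction l with
  | nil => intro r m s w wm c; simp
  | cons a t ih =>
    intro r m s w wm c
    rw [List.foldl_cons, pvStepA_eq, ih]
    simp only [PySem.Dict.mk.injEq, List.cons.injEq, Prod.mk.injEq, List.mem_cons,
      List.count_cons, List.countP_cons, and_true, true_and]
    and_intros <;> (try simp only [beq_iff_eq, @eq_comm String a]) <;> split_ifs <;>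
      first | rfl | (push_cast; omega) | tauto

theorem pvSumMapAdd (M : List String) (f g : String → Int) :
    (M.map (fun k => f k + g k)).sum = (M.map f).sum + (M.map g).sum := by
  induction M with
  | nil => simp
  | cons a t ih => simp [ih]; ring

theorem pvSumSingle (M : List String) (hM : M.Nodup) (a : String) :
    (M.map (fun k => if a = k then (1:Int) else 0)).sum = if a ∈ M then 1 else 0 := by
  induction M with
  | nil => simp
  | cons b t ih =>
    simp only [List.map_cons, List.sum_cons, List.mem_cons, List.nodup_cons] at *
    rcases hM with ⟨hb, ht⟩
    by_cases hab : a = b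
    · subst hab; simp [ih ht, hb]
    · simp [hab, ih ht]

theorem pvSumFilterCount (p : String → Bool) (K : List String) (hK : K.Nodup)
    (l : List String) (hsub : ∀ x ∈ l, x ∈ K) :
    ((K.filter p).map (fun k => ((l.count k : Int)))).sum = (l.countP p : Int) := by
  induction l with
  | nil => simp
  | cons a t ih =>
    have ha : a ∈ K := hsub a (List.mem_cons_self ..)
    have ht : ∀ x ∈ t, x ∈ K := fun x hx => hsub x (List.mem_cons_of_mem _ hx)
    have step : (fun k => ((List.count k (a :: t) : Int))) =
        (fun k => ((t.count k : Int)) + (if a = k then 1 else 0)) := by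
      funext k
      simp [List.count_cons]
    simp only [step, pvSumMapAdd, ih ht, List.countP_cons]
    rw [pvSumSingle _ (hK.filter p) a]
    have : a ∈ K.filter p ↔ p a := by simp [List.mem_filter, ha]
    simp only [this]
    push_cast
    split_ifs <;> omega

theorem pvFoldAppend (awards : List (List (String × String))) :
    awards.foldl (fun acc x => acc ++ [pvTy x]) [] = awards.map pvTy := by
  rw [PySem.List.foldl_append_eq_flatMap]
  induction awards <;> simp_all [List.flatMap]

theorem pvFoldB (awards : List (List (String × String))) :
    awards.foldl (fun d x => pvStepB d (pvTy x)) PySem.Dict.empty =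
    PySem.Dict.counter (awards.map pvTy) := by
  rw [← PySem.Dict.foldl_insert_getD_add_one_eq_counter, List.foldl_map]
  rfl

-- ===== VERDICT (by name: the statement is the Claim_ definition above) =====
theorem generate_awards_spec : Claim_equal_generate_awards := by
  intro awards _ _
  simp only [Spec_generate_awards, generate_awards, generate_awards_alt]
  rw [pvFoldAppend, pvFoldB, pvFoldA]
  set L := awards.map pvTy with hL
  simp only [PySem.Dict.getD_counter, PySem.Dict.items_counter, zero_add,
    List.cons.injEq, Prod.mk.injEq, true_and, and_true]
  refine ⟨?_, ?_⟩
  · -- roy: the flag is set iff the type occurs, i.e. its count is nonzero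
    by_cases hm : "Rookie of the Year" ∈ L
    · simp [hm, (List.count_pos_iff.mpr hm).ne']
    · simp [hm, List.count_eq_zero.mpr hm]
  · -- ss: the prefix-filtered sum of per-key counts is the countP over the list
    rw [show pvSS = (fun x => PySem.Str.slice x none (some 14) == "Silver Slugger") from rfl]
    rw [List.filter_map, List.map_map]
    have h := pvSumFilterCount (fun x => PySem.Str.slice x none (some 14) == "Silver Slugger")
      (PySem.Set.ofList L) (PySem.Set.nodup_ofList L) L
      (fun x hx => (PySem.Set.mem_ofList ..).mpr hx)
    simpa [Function.comp_def] using h.symm
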